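-- pv_equiv track=rewrite | github.com/Paterne-Byiringiro/Uber-Career-Prep-Homework-Paterne-Byiringiro | Uber homework.py | isStringPermutation
-- ===== SOURCE A (Python) =====
-- def isStringPermutation(s1, s2):
--
--     def make_dict(string):
--         my_dict = {}
--         for i in string:
--             if i in my_dict:
--                 my_dict[i] += 1
--             else:
--                 my_dict[i] = 1
--         return my_dict
--
--     dict_1 = make_dict(s1)
--     dict_2 = make_dict(s2)
--
--     return dict_1 == dict_2
-- ===== SOURCE B (Python) =====
-- def isStringPermutation(s1, s2):
--     return sorted(s1) == sorted(s2)
-- ===== Notes on version B (the rewrite author's own statement) =====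
-- stated objective: simpler
-- what changed: B replaces A's two hand-built character-frequency dictionaries and dict comparison by sorting both strings and comparing the sorted character sequences.
import Mathlib
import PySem

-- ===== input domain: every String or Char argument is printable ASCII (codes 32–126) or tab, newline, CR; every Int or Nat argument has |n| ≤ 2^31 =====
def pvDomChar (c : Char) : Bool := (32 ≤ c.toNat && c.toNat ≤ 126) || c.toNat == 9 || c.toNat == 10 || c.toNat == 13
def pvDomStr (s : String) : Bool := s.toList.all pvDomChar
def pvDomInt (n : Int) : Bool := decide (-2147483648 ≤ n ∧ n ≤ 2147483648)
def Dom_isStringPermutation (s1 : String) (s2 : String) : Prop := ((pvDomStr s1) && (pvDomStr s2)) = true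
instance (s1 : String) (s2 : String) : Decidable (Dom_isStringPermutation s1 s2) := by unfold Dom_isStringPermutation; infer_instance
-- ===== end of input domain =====

-- B sorts both strings and compares the sorted character sequences instead of
-- A's comparison of two hand-built character-frequency dictionaries (objective: simpler).


-- ===== PORT A =====
-- make_dict: the character-frequency dictionary built key by key
def pvMakeDict (string : List Char) : PySem.Dict Char Int :=
  string.foldl
    (fun my_dict i =>
      if my_dict.contains i then my_dict.modify i 0 (· + 1) else my_dict.insert i 1)
    PySem.Dict.empty

-- Python's dict == ignores insertion order: same key set and the same value at every key
def isStringPermutation (s1 : String) (s2 : String) : Bool :=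
  let dict_1 := pvMakeDict s1.toList
  let dict_2 := pvMakeDict s2.toList
  PySem.Set.equal dict_1.keys dict_2.keys &&
    dict_1.keys.all (fun k => dict_1.get? k == dict_2.get? k)

-- ===== PORT B =====
def isStringPermutation_alt (s1 : String) (s2 : String) : Bool :=
  PySem.List.sorted s1.toList (fun c => c) false == PySem.List.sorted s2.toList (fun c => c) false

-- ===== PRECONDITION & SPEC =====
def Spec_isStringPermutation (s1 : String) (s2 : String) (out : Bool) : Prop := out = isStringPermutation_alt s1 s2
instance (s1 : String) (s2 : String) (out : Bool) : Decidable (Spec_isStringPermutation s1 s2 out) := by unfold Spec_isStringPermutation; infer_instance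

-- ===== CLAIM (what is proved, stated in full; the proofs are below) =====
def Claim_equal_isStringPermutation : Prop := ∀ (s1 : String) (s2 : String), Dom_isStringPermutation s1 s2 → Spec_isStringPermutation s1 s2 (isStringPermutation s1 s2)

-- ===== LEMMAS AND PROOFS =====

-- the 'if contains then bump else insert 1' body of make_dict is exactly Counter's step
theorem pvMakeDict_eq_counter (xs : List Char) :
    pvMakeDict xs = PySem.Dict.counter xs := by
  rw [PySem.Dict.counter_eq_foldl]
  unfold pvMakeDict
  congr 1
  funext d i
  by_cases h : d.contains i
  · simp [h]
  · have h2 : d.get? i = none := by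
      rw [PySem.Dict.contains_eq_isSome_get?] at h
      exact Option.not_isSome_iff_eq_none.mp (by simp [h])
    simp [h, PySem.Dict.modify, PySem.Dict.getD, h2]

theorem get?_counter (xs : List Char) (v : Char) :
    (PySem.Dict.counter xs).get? v = if v ∈ xs then some ((xs.count v : Int)) else none := by
  have hmem : (PySem.Dict.counter xs).contains v = true ↔ v ∈ xs := by
    rw [PySem.Dict.contains_iff_mem_keys, PySem.Dict.keys_counter, PySem.Set.mem_ofList]
  by_cases hv : v ∈ xs
  · have hc := hmem.mpr hv
    rw [PySem.Dict.contains_eq_isSome_get?] at hc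
    obtain ⟨a, ha⟩ := Option.isSome_iff_exists.mp hc
    have := PySem.Dict.getD_of_get?_eq_some (d := PySem.Dict.counter xs) (d0 := (0 : Int)) ha
    rw [PySem.Dict.getD_counter] at this
    simp [hv, ha, ← this]
  · have hc : (PySem.Dict.counter xs).contains v = false := by
      cases h : (PySem.Dict.counter xs).contains v
      · rfl
      · exact absurd (hmem.mp h) hv
    rw [PySem.Dict.contains_eq_isSome_get?] at hc
    simp [hv]
    exact Option.not_isSome_iff_eq_none.mp (by simp [hc])

theorem portA_iff_perm (s1 s2 : String) :
    isStringPermutation s1 s2 = true ↔ s1.toList.Perm s2.toList := by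
  unfold isStringPermutation
  simp only [pvMakeDict_eq_counter, Bool.and_eq_true, PySem.Set.equal_iff,
    List.all_eq_true, beq_iff_eq, PySem.Dict.keys_counter, PySem.Set.mem_ofList,
    List.perm_iff_count]
  constructor
  · rintro ⟨hkeys, hvals⟩ c
    by_cases hc : c ∈ s1.toList
    · have := hvals c hc
      rw [get?_counter, get?_counter, if_pos hc, if_pos ((hkeys c).mp hc)] at this
      exact_mod_cast Option.some.inj this
    · have hc2 : c ∉ s2.toList := fun h => hc ((hkeys c).mpr h)
      simp [List.count_eq_zero_of_not_mem hc, List.count_eq_zero_of_not_mem hc2]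
  · intro hcount
    have hmem : ∀ c, c ∈ s1.toList ↔ c ∈ s2.toList := by
      intro c
      rw [← List.count_pos_iff, ← List.count_pos_iff, hcount c]
    refine ⟨hmem, fun k hk => ?_⟩
    rw [get?_counter, get?_counter, if_pos hk, if_pos ((hmem k).mp hk), hcount k]

theorem portB_iff_perm (s1 s2 : String) :
    isStringPermutation_alt s1 s2 = true ↔ s1.toList.Perm s2.toList := by
  unfold isStringPermutation_alt
  rw [beq_iff_eq]
  constructor
  · intro h
    exact ((PySem.List.sorted_perm s1.toList (fun c => c) false).symm.trans
      (h ▸ PySem.List.sorted_perm s2.toList (fun c => c) false))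
  · intro h
    apply PySem.List.sorted_id_eq_of_perm_of_pairwise
    · exact (PySem.List.sorted_perm s2.toList (fun c => c) false).trans h.symm
    · exact PySem.List.sorted_pairwise s2.toList (fun c => c)

-- ===== VERDICT (by name: the statement is the Claim_ definition above) =====
theorem isStringPermutation_spec : Claim_equal_isStringPermutation := by
  intro s1 s2 _
  unfold Spec_isStringPermutation
  rw [Bool.eq_iff_iff, portA_iff_perm, portB_iff_perm]
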